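-- pv_equiv track=rewrite | github.com/eXzacT/recursion-practice-python | python/src/tiles_in_powers.py | tiles_in_powers
-- ===== SOURCE A (Python) =====
-- import math
--
-- def tiles_in_powers(m: int, n: int) -> list[int]:
--     tiles = []
--
--     def helper(m: int, n: int):
--         if m == 0 or n == 0:
--             return
--         if m == 1 or n == 1:
--             for _ in range(max(m, n)):
--                 tiles.append(1)  # Add tiles of 1x1 max amount of times
--             return
--
--         min_dimension = min(m, n)
--         max_power = int(math.log2(min_dimension))
--         max_tile = 1 << max_power
--         tiles.append(max_tile)
--
--         # Call it on the 2 remaining slices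
--         helper(m-max_tile, n)
--         # Can't use m, because that space is used in previous call
--         helper(max_tile, n-max_tile)
--
--     helper(m, n)
--     return tiles
-- ===== SOURCE B (Python) =====
-- def tiles_in_powers(m: int, n: int) -> list[int]:
--     tiles = []
--     stack = [(m, n)]
--     while stack:
--         a, b = stack.pop()
--         if a == 0 or b == 0:
--             continue
--         if a == 1 or b == 1:
--             tiles.extend([1] * max(a, b))
--             continue
--         t = 1 << (min(a, b).bit_length() - 1)
--         tiles.append(t)
--         # push in reverse of the processing order
--         stack.append((t, b - t))
--         stack.append((a - t, b))
--     return tiles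
-- ===== Notes on version B (the rewrite author's own statement) =====
-- stated objective: alternative
-- what changed: Replaced A's nested recursive helper that mutates a closure list by a single iterative loop over an explicit stack of (m, n) sub-rectangle tasks (pushed in reverse so pop order reproduces A's pre-order emission), computing the tile size with bit_length instead of math.log2.
import Mathlib
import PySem

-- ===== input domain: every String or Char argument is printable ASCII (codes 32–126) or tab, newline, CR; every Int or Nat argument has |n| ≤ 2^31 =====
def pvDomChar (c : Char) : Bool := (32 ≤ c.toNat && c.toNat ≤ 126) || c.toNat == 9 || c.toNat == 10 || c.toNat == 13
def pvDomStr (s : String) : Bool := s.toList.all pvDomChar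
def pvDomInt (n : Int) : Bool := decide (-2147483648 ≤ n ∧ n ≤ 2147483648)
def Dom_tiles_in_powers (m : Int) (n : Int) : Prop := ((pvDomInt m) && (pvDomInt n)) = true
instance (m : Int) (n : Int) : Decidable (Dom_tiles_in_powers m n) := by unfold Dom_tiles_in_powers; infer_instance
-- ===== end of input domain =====

-- B replaces A's recursive closure-mutating helper by an iterative loop over an explicit
-- stack of sub-rectangle tasks (alternative decomposition; same asymptotic cost).

-- arithmetic facts cited by the ports' decreasing_by blocks (termination only)
theorem tiles_one_le_pow2 (e : Nat) : (1:Int) ≤ 2^e := one_le_pow₀ (by norm_num)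

theorem tiles_pow_log2_le {x : Int} (hx : 1 ≤ x) : (2:Int)^Nat.log2 x.toNat ≤ x := by
  have hx0 : (0:Int) < x := lt_of_lt_of_le zero_lt_one hx
  have hk : x.toNat ≠ 0 := by simpa [Int.toNat_eq_zero] using not_le.mpr hx0
  calc (2:Int)^Nat.log2 x.toNat = ((2^Nat.log2 x.toNat : Nat) : Int) := by push_cast; rfl
  _ ≤ (x.toNat : Int) := by exact_mod_cast Nat.log2_self_le hk
  _ = x := Int.toNat_of_nonneg (le_of_lt hx0)

theorem tiles_two_le_pow_log2 {x : Int} (hx : 2 ≤ x) : (2:Int) ≤ 2^Nat.log2 x.toNat := by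
  have hk : x.toNat ≠ 0 := by simpa [Int.toNat_eq_zero] using not_le.mpr (lt_of_lt_of_le zero_lt_two hx)
  have hlog : 1 ≤ Nat.log2 x.toNat := by
    rw [Nat.le_log2 hk]
    exact_mod_cast (by simpa using Int.toNat_le_toNat hx : (2:Int).toNat ≤ x.toNat)
  calc (2:Int) = 2^1 := (pow_one 2).symm
  _ ≤ 2^Nat.log2 x.toNat := pow_le_pow_right₀ one_le_two hlog

theorem tiles_decA1 {m n T : Int} (h1 : 1 ≤ T) (h2 : T ≤ m) (hm : 1 ≤ m) (hn : 1 ≤ n) :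
    (m - T + n).toNat < (m + n).toNat :=
  (Int.toNat_lt_toNat (add_pos (lt_of_lt_of_le zero_lt_one hm) (lt_of_lt_of_le zero_lt_one hn))).mpr
    (add_lt_add_left (Int.sub_lt_self m (lt_of_lt_of_le zero_lt_one h1)) n)

theorem tiles_decA2 {m n T : Int} (hm : 1 ≤ m) (hn : 1 ≤ n) :
    (T + (n - T)).toNat < (m + n).toNat := by
  rw [add_sub_cancel]
  exact (Int.toNat_lt_toNat (add_pos (lt_of_lt_of_le zero_lt_one hm) (lt_of_lt_of_le zero_lt_one hn))).mpr
    (lt_add_of_pos_left n (lt_of_lt_of_le zero_lt_one hm))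

-- weight of one stack entry, used only for the loop's termination measure
def tiles_wt (p : Int × Int) : Nat := (p.1 * p.2).toNat + 1

theorem tiles_natfin {p q r pq s : Nat} (hA : p + q = pq) (hB : pq + 4 ≤ r) :
    p + 1 + (q + 1 + s) < r + 1 + s := by
  calc p + 1 + (q + 1 + s) = p + q + 2 + s := by ac_rfl
  _ < p + q + 5 + s := Nat.add_lt_add_right (Nat.add_lt_add_left (by norm_num) _) s
  _ = (p + q + 4) + 1 + s := by ac_rfl
  _ ≤ r + 1 + s := Nat.add_le_add_right (Nat.add_le_add_right (hA ▸ hB) 1) s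

theorem tiles_loop_measure {a b T : Int} (ha : 2 ≤ a) (hb : 2 ≤ b)
    (hTa : T ≤ a) (hTb : T ≤ b) (hT2 : 2 ≤ T) (s : Nat) :
    ((a - T)*b).toNat + 1 + ((T*(b-T)).toNat + 1 + s) < (a*b).toNat + 1 + s := by
  have hT0 : (0:Int) ≤ T := le_trans zero_le_two hT2
  have hb0 : (0:Int) ≤ b := le_trans zero_le_two hb
  have hP : (0:Int) ≤ (a - T)*b := mul_nonneg (sub_nonneg.mpr hTa) hb0
  have hQ : (0:Int) ≤ T*(b - T) := mul_nonneg hT0 (sub_nonneg.mpr hTb)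
  have h4 : (4:Int) ≤ T*T := by
    calc (4:Int) = 2*2 := by norm_num
    _ ≤ T*T := mul_le_mul hT2 hT2 zero_le_two hT0
  have e : (a - T)*b + T*(b - T) = a*b - T*T := by ring
  have hPQ : (a - T)*b + T*(b - T) + 4 ≤ a*b := by
    rw [e]
    calc a*b - T*T + 4 ≤ a*b - T*T + (T*T) := Int.add_le_add_left h4 _
    _ = a*b := sub_add_cancel (a*b) (T*T)
  have hA : ((a - T)*b).toNat + (T*(b - T)).toNat = ((a - T)*b + T*(b - T)).toNat :=
    (Int.toNat_add hP hQ).symm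
  have hB : ((a - T)*b + T*(b - T)).toNat + 4 ≤ (a*b).toNat := by
    have := Int.toNat_le_toNat hPQ
    rwa [Int.toNat_add (add_nonneg hP hQ) (by norm_num), show ((4:Int)).toNat = 4 from rfl] at this
  exact tiles_natfin hA hB

theorem tiles_dec0 (a b : Int) (rest : List (Int × Int)) :
    (List.map tiles_wt rest).sum < (List.map tiles_wt ((a, b) :: rest)).sum := by
  simp only [List.map_cons, List.sum_cons, tiles_wt]
  exact Nat.lt_add_of_pos_left (Nat.succ_pos _)

theorem tiles_decB {a b T : Int} (h0 : ¬(a = 0 ∨ b = 0)) (h1 : ¬(a = 1 ∨ b = 1))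
    (h2 : ¬(a ≤ 0 ∨ b ≤ 0)) (hT : T ≤ min a b) (hT2 : 2 ≤ T) (rest : List (Int × Int)) :
    (List.map tiles_wt ((a - T, b) :: (T, b - T) :: rest)).sum <
      (List.map tiles_wt ((a, b) :: rest)).sum := by
  simp only [List.map_cons, List.sum_cons, tiles_wt]
  exact tiles_loop_measure (by omega) (by omega) (le_trans hT (min_le_left a b))
    (le_trans hT (min_le_right a b)) hT2 _

-- ===== PORT A =====
-- A's nested recursive helper; `none` = the ValueError math.log2 raises on a nonpositive
-- argument. int(math.log2(x)) is ported as Nat.log2 (floor of log2), exact for 1 ≤ x ≤ 2^31.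
def tiles_helper (m : Int) (n : Int) : Option (List Int) :=
  if m = 0 ∨ n = 0 then some []
  else if m = 1 ∨ n = 1 then some (List.replicate (max m n).toNat 1)
  else if min m n ≤ 0 then none   -- math.log2 raises ValueError here
  else
    let t : Int := (2 : Int) ^ Nat.log2 (min m n).toNat
    match tiles_helper (m - t) n, tiles_helper t (n - t) with
    | some l1, some l2 => some (t :: (l1 ++ l2))
    | _, _ => none
termination_by (m + n).toNat
decreasing_by
  · exact tiles_decA1 (tiles_one_le_pow2 _)
      (le_trans (tiles_pow_log2_le (by omega)) (min_le_left m n)) (by omega) (by omega)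
  · exact tiles_decA2 (by omega) (by omega)

def tiles_in_powers (m : Int) (n : Int) : List Int := (tiles_helper m n).getD []

-- ===== PORT B =====
-- 1 << (min(a,b).bit_length() - 1) is ported as 2 ^ Nat.log2, exact for a positive argument.
def tiles_loop : List (Int × Int) → List Int
  | [] => []
  | (a, b) :: rest =>
    if a = 0 ∨ b = 0 then tiles_loop rest
    else if a = 1 ∨ b = 1 then List.replicate (max a b).toNat 1 ++ tiles_loop rest
    else if a ≤ 0 ∨ b ≤ 0 then tiles_loop rest
      -- totality guard only: here the Python loop never terminates; such tasks never arise inside Pre_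
    else
      let t : Int := (2 : Int) ^ Nat.log2 (min a b).toNat
      t :: tiles_loop ((a - t, b) :: (t, b - t) :: rest)
termination_by s => (s.map tiles_wt).sum
decreasing_by
  · exact tiles_dec0 a b rest
  · exact tiles_dec0 a b rest
  · exact tiles_dec0 a b rest
  · exact tiles_decB ‹_› ‹_› ‹_› (tiles_pow_log2_le (by omega)) (tiles_two_le_pow_log2 (by omega)) rest

def tiles_in_powers_alt (m : Int) (n : Int) : List Int := tiles_loop [(m, n)]

-- ===== PRECONDITION & SPEC =====
-- Pre_ excludes exactly the inputs on which A raises: math.log2 gets a nonpositive argument,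
-- reached when neither dimension is 0 or 1 and at least one of them is negative.
def Pre_tiles_in_powers (m : Int) (n : Int) : Prop :=
  m = 0 ∨ n = 0 ∨ m = 1 ∨ n = 1 ∨ (2 ≤ m ∧ 2 ≤ n)
instance (m : Int) (n : Int) : Decidable (Pre_tiles_in_powers m n) := by
  unfold Pre_tiles_in_powers; infer_instance

def pvWitness_tiles_in_powers : Int × Int := (6, 10)

def Spec_tiles_in_powers (m : Int) (n : Int) (out : List Int) : Prop := out = tiles_in_powers_alt m n
instance (m : Int) (n : Int) (out : List Int) : Decidable (Spec_tiles_in_powers m n out) := by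
  unfold Spec_tiles_in_powers; infer_instance

-- ===== CLAIM (what is proved, stated in full; the proofs are below) =====
def Claim_equal_tiles_in_powers : Prop := ∀ (m : Int) (n : Int), Dom_tiles_in_powers m n → Pre_tiles_in_powers m n → Spec_tiles_in_powers m n (tiles_in_powers m n)

-- ===== LEMMAS AND PROOFS =====

-- main invariant: on a Pre_-task the recursive helper succeeds, and the stack loop emits
-- exactly its tiles before continuing with the remaining tasks
theorem tiles_loop_helper_aux : ∀ (N : Nat) (m n : Int), (m + n).toNat = N →
    Pre_tiles_in_powers m n →
    ∃ l, tiles_helper m n = some l ∧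
      ∀ rest, tiles_loop ((m, n) :: rest) = l ++ tiles_loop rest := by
  intro N
  induction N using Nat.strong_induction_on with
  | _ N IH =>
    intro m n hN hp
    by_cases h0 : m = 0 ∨ n = 0
    · refine ⟨[], ?_, ?_⟩
      · simp [tiles_helper, h0]
      · intro rest; simp [tiles_loop, h0]
    · by_cases h1 : m = 1 ∨ n = 1
      · refine ⟨List.replicate (max m n).toNat 1, ?_, ?_⟩
        · simp [tiles_helper, h0, h1]
        · intro rest; simp [tiles_loop, h0, h1]
      · have hmn : 2 ≤ m ∧ 2 ≤ n := by
          rcases hp with h | h | h | h | h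
          · exact absurd (Or.inl h) h0
          · exact absurd (Or.inr h) h0
          · exact absurd (Or.inl h) h1
          · exact absurd (Or.inr h) h1
          · exact h
        obtain ⟨E, hEdef, ht, ht2⟩ :
            ∃ E : Int, E = (2 : Int) ^ Nat.log2 (min m n).toNat ∧ E ≤ min m n ∧ 2 ≤ E :=
          ⟨_, rfl, tiles_pow_log2_le (by omega), tiles_two_le_pow_log2 (by omega)⟩
        have hpre1 : Pre_tiles_in_powers (m - E) n := by unfold Pre_tiles_in_powers; omega
        have hpre2 : Pre_tiles_in_powers E (n - E) := by unfold Pre_tiles_in_powers; omega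
        obtain ⟨l1, e1, f1⟩ :=
          IH (m - E + n).toNat (by omega) (m - E) n rfl hpre1
        obtain ⟨l2, e2, f2⟩ :=
          IH (E + (n - E)).toNat (by omega) E (n - E) rfl hpre2
        have hnot : ¬ (min m n ≤ 0) := by omega
        have hnot2 : ¬ (m ≤ 0 ∨ n ≤ 0) := by omega
        refine ⟨E :: (l1 ++ l2), ?_, ?_⟩
        · rw [tiles_helper, if_neg h0, if_neg h1, if_neg hnot]
          simp only [← hEdef]
          rw [e1, e2]
        · intro rest
          rw [tiles_loop, if_neg h0, if_neg h1, if_neg hnot2]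
          simp only [← hEdef]
          rw [f1, f2]
          simp [List.append_assoc]

theorem tiles_loop_helper (m n : Int) (hp : Pre_tiles_in_powers m n) :
    ∃ l, tiles_helper m n = some l ∧
      ∀ rest, tiles_loop ((m, n) :: rest) = l ++ tiles_loop rest :=
  tiles_loop_helper_aux (m + n).toNat m n rfl hp

-- ===== VERDICT (by name: the statement is the Claim_ definition above) =====
theorem tiles_in_powers_spec : Claim_equal_tiles_in_powers := by
  intro m n _ hp
  obtain ⟨l, h1, h2⟩ := tiles_loop_helper m n hp
  unfold Spec_tiles_in_powers tiles_in_powers tiles_in_powers_alt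
  rw [h1, h2 []]; simp [tiles_loop]
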